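-- pv_equiv track=rewrite | github.com/thiagopelizoni/ProjectEuler | src/problem_412.py | row_prod
-- ===== SOURCE A (Python) =====
-- def row_prod(i, m, n, mod):
--     l = m - n
--     lam_i = m if i <= l else l
--     res = 1
--     for j in range(1, lam_i + 1):
--         lam_j = m if j <= l else l
--         h = lam_i + lam_j - i - j + 1
--         res = (res * h) % mod
--     return res
-- ===== SOURCE B (Python) =====
-- def row_prod(i, m, n, mod):
--     l = m - n
--     lam = m if i <= l else l
--
--     def hook(j):
--         return lam + (m if j <= l else l) - i - j + 1
--
--     def prod(a, b):
--         # hook-length product over j in [a, b), reduced mod `mod` (1 for an empty range)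
--         if b - a <= 0:
--             return 1
--         if b - a == 1:
--             return hook(a) % mod
--         mid = (a + b) // 2
--         return prod(a, mid) * prod(mid, b) % mod
--
--     return prod(1, lam + 1)
-- ===== Notes on version B (the rewrite author's own statement) =====
-- stated objective: alternative
-- what changed: Replaces A's left-to-right loop with a per-iteration modular fold by a recursive divide-and-conquer product: the hook-length product over an index interval is computed by splitting the interval at its midpoint, recursing on both halves and combining the two reduced halves with one modular multiplication (different association order, justified by modular arithmetic).
import Mathlib
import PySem

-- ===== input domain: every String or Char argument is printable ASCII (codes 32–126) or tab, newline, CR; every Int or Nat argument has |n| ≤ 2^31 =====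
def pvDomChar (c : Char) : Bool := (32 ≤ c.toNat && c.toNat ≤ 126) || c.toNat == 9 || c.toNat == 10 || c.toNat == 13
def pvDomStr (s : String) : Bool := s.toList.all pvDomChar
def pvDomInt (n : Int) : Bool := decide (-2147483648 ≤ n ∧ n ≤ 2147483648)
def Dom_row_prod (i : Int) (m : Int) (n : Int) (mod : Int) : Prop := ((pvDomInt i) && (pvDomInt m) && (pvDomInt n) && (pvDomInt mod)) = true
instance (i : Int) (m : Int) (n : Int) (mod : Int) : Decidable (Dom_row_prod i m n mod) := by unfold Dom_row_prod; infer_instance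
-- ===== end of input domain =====

-- B replaces A's left-to-right modular fold with a recursive divide-and-conquer product over the
-- same hook lengths (a different association order, proved harmless by modular arithmetic); objective: alternative.


-- ===== PORT A =====
def row_prod (i : Int) (m : Int) (n : Int) (mod : Int) : Int :=
  let l := m - n
  let lam_i := if i ≤ l then m else l
  (PySem.List.pyRange 1 (lam_i + 1) 1).foldl
    (fun res j =>
      let lam_j := if j ≤ l then m else l
      PySem.Int.mod (res * (lam_i + lam_j - i - j + 1)) mod) 1

-- ===== PORT B =====
-- B's closure hook(j)
def pv_hook (l lam m i : Int) (j : Int) : Int :=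
  lam + (if j ≤ l then m else l) - i - j + 1

-- needed for the port's termination proof (cited in decreasing_by)
theorem pv_mid_bounds (a b : Int) (h2 : ¬ b - a ≤ 0) (h3 : ¬ b - a = 1) :
    a < PySem.Int.floordiv (a + b) 2 ∧ PySem.Int.floordiv (a + b) 2 < b := by
  unfold PySem.Int.floordiv
  have hq := Int.mul_fdiv_add_fmod (a + b) 2
  have hr1 : 0 ≤ (a + b).fmod 2 := by
    rw [Int.fmod_eq_emod]
    have := Int.emod_nonneg (a + b) (b := 2) (by norm_num)
    split_ifs with h
    · omega
    · exact absurd (Or.inl (by norm_num)) h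
  have hr2 : (a + b).fmod 2 < 2 := by
    rw [Int.fmod_eq_emod]
    have := Int.emod_lt_of_pos (a + b) (b := 2) (by norm_num)
    split_ifs with h
    · omega
    · exact absurd (Or.inl (by norm_num)) h
  omega

-- B's recursive divide-and-conquer product: hook-length product over j ∈ [a, b), reduced mod md
def pv_tree (l lam m i md : Int) (a b : Int) : Int :=
  if h2 : b - a ≤ 0 then 1
  else if h3 : b - a = 1 then PySem.Int.mod (pv_hook l lam m i a) md
  else
    PySem.Int.mod (pv_tree l lam m i md a (PySem.Int.floordiv (a + b) 2)
      * pv_tree l lam m i md (PySem.Int.floordiv (a + b) 2) b) md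
termination_by (b - a).toNat
decreasing_by
  · have h := pv_mid_bounds a b h2 h3; omega
  · have h := pv_mid_bounds a b h2 h3; omega

def row_prod_alt (i : Int) (m : Int) (n : Int) (mod : Int) : Int :=
  let l := m - n
  let lam := if i ≤ l then m else l
  pv_tree l lam m i mod 1 (lam + 1)

-- ===== PRECONDITION & SPEC =====
-- Pre_ excludes exactly the inputs where the Python raises ZeroDivisionError: mod = 0 with a nonempty row.
def Pre_row_prod (i : Int) (m : Int) (n : Int) (mod : Int) : Prop :=
  mod ≠ 0 ∨ (if i ≤ m - n then m else m - n) < 1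
instance (i : Int) (m : Int) (n : Int) (mod : Int) : Decidable (Pre_row_prod i m n mod) := by unfold Pre_row_prod; infer_instance
def pvWitness_row_prod : Int × Int × Int × Int := (2, 5, 2, 1000)

def Spec_row_prod (i : Int) (m : Int) (n : Int) (mod : Int) (out : Int) : Prop := out = row_prod_alt i m n mod
instance (i : Int) (m : Int) (n : Int) (mod : Int) (out : Int) : Decidable (Spec_row_prod i m n mod out) := by unfold Spec_row_prod; infer_instance

-- ===== CLAIM (what is proved, stated in full; the proofs are below) =====
def Claim_equal_row_prod : Prop := ∀ (i : Int) (m : Int) (n : Int) (mod : Int), Dom_row_prod i m n mod → Pre_row_prod i m n mod → Spec_row_prod i m n mod (row_prod i m n mod)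

-- ===== LEMMAS AND PROOFS =====

theorem pv_fmod_mul_left (a b nn : Int) : ((a.fmod nn) * b).fmod nn = (a * b).fmod nn := by
  rw [Int.mul_fmod, Int.fmod_fmod_of_dvd a dvd_rfl, ← Int.mul_fmod]

theorem pv_mod_mul_mod (a b md : Int) :
    PySem.Int.mod (PySem.Int.mod a md * PySem.Int.mod b md) md = PySem.Int.mod (a * b) md := by
  simp only [PySem.Int.mod]
  exact (Int.mul_fmod a b md).symm

-- a fold taking fmod at every step over a NONEMPTY list is the fmod of the product
theorem pv_foldl_fmod (h : Int → Int) (md : Int) :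
    ∀ (L : List Int), L ≠ [] → ∀ (r : Int),
      L.foldl (fun res j => ((res * h j).fmod md)) r = ((r * (L.map h).prod).fmod md) := by
  intro L
  induction L with
  | nil => intro hne; exact absurd rfl hne
  | cons x L ih =>
    intro _ r
    cases L with
    | nil => simp
    | cons y L' =>
      rw [List.foldl_cons, ih (by simp)]
      rw [pv_fmod_mul_left]
      simp [mul_assoc]

theorem pv_foldl_mod (h : Int → Int) (md : Int) (L : List Int) (hne : L ≠ []) (r : Int) :
    L.foldl (fun res j => PySem.Int.mod (res * h j) md) r = PySem.Int.mod (r * (L.map h).prod) md := by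
  simp only [PySem.Int.mod]
  exact pv_foldl_fmod h md L hne r

-- the tree product over a nonempty interval equals the mod of the plain range product of hooks
theorem pv_tree_eq (l lam m i md : Int) :
    ∀ (k : Nat) (a b : Int), b - a = (k : Int) → 1 ≤ k →
      pv_tree l lam m i md a b
        = PySem.Int.mod (((PySem.List.pyRange a b 1).map (pv_hook l lam m i)).prod) md := by
  intro k
  induction k using Nat.strong_induction_on with
  | _ k ih =>
    intro a b hk hk1
    rw [pv_tree]
    by_cases h2 : b - a ≤ 0
    · omega
    · rw [dif_neg h2]
      by_cases h3 : b - a = 1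
      · rw [dif_pos h3]
        have hb : b = a + 1 := by omega
        subst hb
        rw [PySem.List.pyRange_one_singleton]
        simp
      · rw [dif_neg h3]
        have hmid := pv_mid_bounds a b h2 h3
        set mid := PySem.Int.floordiv (a + b) 2 with hmiddef
        have e1 := ih (mid - a).toNat (by omega) a mid (by omega) (by omega)
        have e2 := ih (b - mid).toNat (by omega) mid b (by omega) (by omega)
        rw [e1, e2, pv_mod_mul_mod,
            PySem.List.pyRange_one_append a mid b (by omega) (by omega),
            List.map_append, List.prod_append]

-- ===== VERDICT (by name: the statement is the Claim_ definition above) =====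
theorem row_prod_spec : Claim_equal_row_prod := by
  intro i m n mod _ _
  unfold Spec_row_prod row_prod row_prod_alt
  dsimp only
  set l := m - n with hldef
  set lam := (if i ≤ l then m else l) with hlamdef
  by_cases hlam : lam < 1
  · rw [PySem.List.pyRange_one_eq_nil (by omega), pv_tree, dif_pos (by omega)]
    rfl
  · rw [pv_tree_eq l lam m i mod lam.toNat 1 (lam + 1) (by omega) (by omega)]
    have hne : PySem.List.pyRange 1 (lam + 1) 1 ≠ [] :=
      List.ne_nil_of_mem (PySem.List.mem_pyRange_one.mpr ⟨le_refl _, by omega⟩)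
    have hfun : (fun (res j : Int) => PySem.Int.mod (res * ((lam + if j ≤ l then m else l) - i - j + 1)) mod)
        = (fun (res j : Int) => PySem.Int.mod (res * pv_hook l lam m i j) mod) := by
      funext res j; rw [pv_hook]
    rw [hfun, pv_foldl_mod (pv_hook l lam m i) mod _ hne 1, one_mul]
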